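-- pv_equiv track=rewrite | github.com/xuao1/open-gpu-kernel-modules-535.104.05 | src/nvidia/src/kernel/add_print.py | insert_debug_info
-- ===== SOURCE A (Python) =====
-- def insert_debug_info(c_code, cnt):
--     lines = c_code.split('\n')
--     modified_lines = []
--     potential_function_start = False
--
--     for i, line in enumerate(lines):
--         modified_lines.append(line)
--
--         # Check for function start
--         if potential_function_start and line.strip().startswith('{'):
--             modified_lines.append('    NV_PRINTF(LEVEL_ERROR, "############### src/nvidia/src/kernel %d\\n", ' + str(cnt) + ');')
--             cnt += 1
--             potential_function_start = False
--         elif line.endswith(')') and not line.startswith(' '):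
--             potential_function_start = True
--         else:
--             potential_function_start = False
--
--     return '\n'.join(modified_lines), cnt
-- ===== SOURCE B (Python) =====
-- def insert_debug_info(c_code, cnt):
--     # Window-consumption scan: when an opener line is immediately followed by a
--     # brace line, emit both plus the debug print and consume two lines at once,
--     # instead of carrying a one-line boolean flag through a state machine.
--     lines = c_code.split('\n')
--     out = []
--     i = 0
--     n = len(lines)
--     while i < n:
--         line = lines[i]
--         out.append(line)
--         if (line.endswith(')') and not line.startswith(' ')
--                 and i + 1 < n and lines[i + 1].strip().startswith('{')):
--             out.append(lines[i + 1])
--             out.append('    NV_PRINTF(LEVEL_ERROR, "############### src/nvidia/src/kernel %d\\n", ' + str(cnt) + ');')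
--             cnt += 1
--             i += 2
--         else:
--             i += 1
--     return '\n'.join(out), cnt
-- ===== Notes on version B (the rewrite author's own statement) =====
-- stated objective: alternative
-- what changed: Replaces A's one-line boolean-flag state machine over every line with an index scan that, on finding an opener line immediately followed by a brace line, emits both lines plus the debug print and consumes two lines at once (which also makes the flag-reset chain behaviour explicit).
import Mathlib
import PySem

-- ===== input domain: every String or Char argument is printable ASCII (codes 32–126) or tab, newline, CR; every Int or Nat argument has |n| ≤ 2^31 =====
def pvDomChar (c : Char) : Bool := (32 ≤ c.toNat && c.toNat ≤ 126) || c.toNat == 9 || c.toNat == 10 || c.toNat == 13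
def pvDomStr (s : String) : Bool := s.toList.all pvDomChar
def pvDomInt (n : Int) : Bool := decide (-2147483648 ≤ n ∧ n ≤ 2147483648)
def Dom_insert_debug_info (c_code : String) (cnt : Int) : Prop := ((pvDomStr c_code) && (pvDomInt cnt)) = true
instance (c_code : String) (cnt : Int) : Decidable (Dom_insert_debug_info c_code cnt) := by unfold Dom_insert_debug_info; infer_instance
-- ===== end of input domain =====

-- B replaces A's one-line boolean flag state machine by a window scan that consumes
-- an opener line and its following brace line in one step (objective: simpler).

-- the inserted debug line (shared text of both Pythons)
def pvPrint (cnt : Int) : String :=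
  "    NV_PRINTF(LEVEL_ERROR, \"############### src/nvidia/src/kernel %d\\n\", " ++ PySem.Int.toStr cnt ++ ");"

def pvBrace (line : String) : Bool := PySem.Str.startswith (PySem.Str.strip line) "{"
def pvOpener (line : String) : Bool :=
  PySem.Str.endswith line ")" && !(PySem.Str.startswith line " ")

-- ===== PORT A =====
-- the for-loop over lines with accumulator, flag and counter
def pvALoop : List String → List String → Bool → Int → List String × Int
  | [], acc, _, cnt => (acc, cnt)
  | line :: rest, acc, flag, cnt =>
    let acc := acc ++ [line]
    if flag && pvBrace line then
      pvALoop rest (acc ++ [pvPrint cnt]) false (cnt + 1)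
    else if pvOpener line then
      pvALoop rest acc true cnt
    else
      pvALoop rest acc false cnt

def insert_debug_info (c_code : String) (cnt : Int) : String × Int :=
  let lines := (PySem.Str.split? c_code "\n").getD []
  let r := pvALoop lines [] false cnt
  (PySem.Str.join "\n" r.1, r.2)

-- ===== PORT B =====
-- while loop advancing by 1 or 2; structural recursion matching on the next line
def pvBLoop : List String → Int → List String × Int
  | [], cnt => ([], cnt)
  | line :: rest, cnt =>
    if pvOpener line then
      match h : rest with
      | next :: rest' =>
        if pvBrace next then
          let r := pvBLoop rest' (cnt + 1)
          (line :: next :: pvPrint cnt :: r.1, r.2)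
        else
          let r := pvBLoop rest cnt
          (line :: r.1, r.2)
      | [] => ([line], cnt)
    else
      let r := pvBLoop rest cnt
      (line :: r.1, r.2)
termination_by l _ => l.length
decreasing_by all_goals simp_all

def insert_debug_info_alt (c_code : String) (cnt : Int) : String × Int :=
  let r := pvBLoop ((PySem.Str.split? c_code "\n").getD []) cnt
  (PySem.Str.join "\n" r.1, r.2)

-- ===== PRECONDITION & SPEC =====
def Spec_insert_debug_info (c_code : String) (cnt : Int) (out : String × Int) : Prop := out = insert_debug_info_alt c_code cnt
instance (c_code : String) (cnt : Int) (out : String × Int) : Decidable (Spec_insert_debug_info c_code cnt out) := by unfold Spec_insert_debug_info; infer_instance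

-- ===== CLAIM (what is proved, stated in full; the proofs are below) =====
def Claim_equal_insert_debug_info : Prop := ∀ (c_code : String) (cnt : Int), Dom_insert_debug_info c_code cnt → Spec_insert_debug_info c_code cnt (insert_debug_info c_code cnt)

-- ===== LEMMAS AND PROOFS =====

-- with the flag up but the current line not a brace line, the flag is irrelevant
theorem pvALoop_true_of_not_brace (line : String) (rest acc : List String) (cnt : Int)
    (h : pvBrace line = false) :
    pvALoop (line :: rest) acc true cnt = pvALoop (line :: rest) acc false cnt := by
  simp [pvALoop, h]

theorem pvALoop_eq_pvBLoop (l : List String) (acc : List String) (cnt : Int) :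
    pvALoop l acc false cnt = (acc ++ (pvBLoop l cnt).1, (pvBLoop l cnt).2) := by
  induction l, cnt using pvBLoop.induct generalizing acc with
  | case1 cnt => simp [pvALoop, pvBLoop]
  | case2 line cnt hop next rest' hbr ih =>
    simp [pvALoop, pvBLoop, hop, hbr, ih]
  | case3 line cnt hop next rest' hbr ih =>
    have hbr' : pvBrace next = false := by simpa using hbr
    have h1 : pvALoop (line :: next :: rest') acc false cnt
        = pvALoop (next :: rest') (acc ++ [line]) true cnt := by
      simp [pvALoop, hop]
    have hB : pvBLoop (line :: next :: rest') cnt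
        = (line :: (pvBLoop (next :: rest') cnt).1, (pvBLoop (next :: rest') cnt).2) := by
      rw [pvBLoop.eq_def]; simp [hop, hbr']
    rw [h1, pvALoop_true_of_not_brace _ _ _ _ hbr', ih, hB]
    simp
  | case4 line cnt hop =>
    simp [pvALoop, pvBLoop, hop]
  | case5 line rest cnt hop ih =>
    have hop' : pvOpener line = false := by simpa using hop
    have hB : pvBLoop (line :: rest) cnt = (line :: (pvBLoop rest cnt).1, (pvBLoop rest cnt).2) := by
      rw [pvBLoop.eq_def]; simp [hop']
    simp [pvALoop, hop', ih, hB]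

-- ===== VERDICT (by name: the statement is the Claim_ definition above) =====
theorem insert_debug_info_spec : Claim_equal_insert_debug_info := by
  intro c_code cnt _
  simp [Spec_insert_debug_info, insert_debug_info, insert_debug_info_alt, pvALoop_eq_pvBLoop]
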